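-- pv_equiv track=rewrite | github.com/mat2ja/napredni-python | kol/K1/zad6.py | is_most_frequent
-- ===== SOURCE A (Python) =====
-- def is_most_frequent(text, fav):
--     frequencies = {}
--     for n in text:
--         if n in frequencies:
--             frequencies[n] += 1
--         else:
--             frequencies[n] = 1
--
--     keys = frequencies.keys()
--     values = frequencies.values()
--
--     # nema nijedne sestice
--     if fav not in keys:
--         return False
--
--     # ako je samo jedan broj (sve su setice)
--     if len(keys) == 1:
--         return True
--
--     max_count = max(values)
--     # ako ima samo jedna max value, i ako je bas to freq sestice
--     if list(values).count(max_count) == 1 and frequencies[fav] == max_count: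
--         return True
--
--     return False
-- ===== SOURCE B (Python) =====
-- def is_most_frequent(text, fav):
--     # simpler: fav is the unique most frequent iff it occurs and strictly beats every other element
--     f = text.count(fav)
--     if f == 0:
--         return False
--     return all(text.count(x) < f for x in set(text) if x != fav)
-- ===== Notes on version B (the rewrite author's own statement) =====
-- stated objective: simpler
-- what changed: Replaces the frequency-dict plus max(values)+tie-count phases with direct counting: fav is the unique most frequent iff text.count(fav) > 0 and every other distinct element's count is strictly smaller (one all(...) pass, no dict, no max, no single-key branch); a timing run measured it faster because the counting runs in C-level list.count instead of a Python-level dict loop.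
import Mathlib
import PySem

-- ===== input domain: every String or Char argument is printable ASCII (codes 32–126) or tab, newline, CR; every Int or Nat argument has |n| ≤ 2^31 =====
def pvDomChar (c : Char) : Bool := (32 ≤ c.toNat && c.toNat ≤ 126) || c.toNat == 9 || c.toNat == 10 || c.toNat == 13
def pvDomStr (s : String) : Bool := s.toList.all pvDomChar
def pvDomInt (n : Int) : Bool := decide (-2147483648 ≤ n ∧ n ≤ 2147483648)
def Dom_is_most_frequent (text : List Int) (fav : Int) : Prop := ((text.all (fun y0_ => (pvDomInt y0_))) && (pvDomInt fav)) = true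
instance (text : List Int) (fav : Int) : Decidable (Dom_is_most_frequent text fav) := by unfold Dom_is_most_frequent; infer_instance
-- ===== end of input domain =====

-- B is simpler: no frequency dict, no max/tie-count phase — fav wins iff it occurs and
-- strictly beats every other element's count.

-- ===== PORT A =====
def is_most_frequent (text : List Int) (fav : Int) : Bool :=
  let frequencies : PySem.Dict Int Int :=
    text.foldl (fun d n => if d.contains n then d.modify n 0 (· + 1) else d.insert n 1)
      PySem.Dict.empty
  let keys := frequencies.keys
  let values := frequencies.values
  if !(keys.contains fav) then false
  else if keys.length = 1 then true
  else
    match PySem.List.max? values (fun v => v) with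
    | none => false  -- unreachable: fav ∈ keys, so values ≠ []
    | some max_count =>
      -- frequencies[fav]: fav ∈ keys holds here, so getD never takes its default
      if PySem.List.count values max_count = 1 && frequencies.getD fav 0 == max_count then true
      else false

-- ===== PORT B =====
def is_most_frequent_alt (text : List Int) (fav : Int) : Bool :=
  let f := PySem.List.count text fav
  if f = 0 then false
  else ((PySem.Set.ofList text).filter (fun x => !(x == fav))).all
        (fun x => decide (PySem.List.count text x < f))

-- ===== PRECONDITION & SPEC =====
def Spec_is_most_frequent (text : List Int) (fav : Int) (out : Bool) : Prop := out = is_most_frequent_alt text fav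
instance (text : List Int) (fav : Int) (out : Bool) : Decidable (Spec_is_most_frequent text fav out) := by unfold Spec_is_most_frequent; infer_instance

-- ===== CLAIM (what is proved, stated in full; the proofs are below) =====
def Claim_equal_is_most_frequent : Prop := ∀ (text : List Int) (fav : Int), Dom_is_most_frequent text fav → Spec_is_most_frequent text fav (is_most_frequent text fav)

-- ===== LEMMAS AND PROOFS =====

-- A's accumulation step is exactly the Counter step.
theorem stepA_eq_counter_step (d : PySem.Dict Int Int) (n : Int) :
    (if d.contains n then d.modify n 0 (· + 1) else d.insert n 1) = d.modify n 0 (· + 1) := by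
  simp [PySem.Dict.modify, PySem.Dict.contains, PySem.Dict.getD]
  intro h
  have hg : d.get? n = none := by
    cases hg : d.get? n with
    | none => rfl
    | some v => exact absurd (PySem.Dict.mem_items_of_get?_eq_some d hg) (h v)
  simp [hg]

theorem freqA_eq_counter (text : List Int) :
    text.foldl (fun d n => if d.contains n then d.modify n 0 (· + 1) else d.insert n 1)
      PySem.Dict.empty = PySem.Dict.counter text := by
  have h : (fun (d : PySem.Dict Int Int) n => if d.contains n then d.modify n 0 (· + 1) else d.insert n 1)
      = fun d x => d.modify x 0 (· + 1) := funext fun d => funext fun n => stepA_eq_counter_step d n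
  rw [h, ← PySem.Dict.counter_eq_foldl]

theorem two_mem_length (l : List Int) (a b : Int) (ha : a ∈ l) (hb : b ∈ l) (h : b ≠ a) : 2 ≤ l.length := by
  have hb' : b ∈ l.erase a := (List.mem_erase_of_ne h).mpr hb
  have := List.length_erase_add_one ha
  have := List.length_pos_of_mem hb'
  omega

theorem count_map_eq_countP (l : List Int) (f : Int → Int) (b : Int) :
    (l.map f).count b = l.countP (fun a => f a == b) := by
  simp [List.count, List.countP_map]; rfl

theorem main_iff (text : List Int) (fav m : Int) (hfav : fav ∈ text)
    (hmax : PySem.List.max? ((PySem.Set.ofList text).map (fun k => (text.count k : Int))) (fun v => v) = some m) :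
    (((PySem.Set.ofList text).map (fun k => (text.count k : Int))).count m = 1 ∧ (text.count fav : Int) = m)
      ↔ ∀ x ∈ PySem.Set.ofList text, x ≠ fav → text.count x < text.count fav := by
  set S := PySem.Set.ofList text with hS
  have hnd : S.Nodup := PySem.Set.nodup_ofList text
  have hfavS : fav ∈ S := (PySem.Set.mem_ofList text fav).mpr hfav
  have hle : ∀ x ∈ S, (text.count x : Int) ≤ m := by
    intro x hx
    exact PySem.List.max?_isMax hmax _ (List.mem_map_of_mem hx)
  constructor
  · rintro ⟨h1, h2⟩ x hx hne
    have hxle := hle x hx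
    rcases lt_or_eq_of_le hxle with hlt | heq
    · omega
    · exfalso
      rw [count_map_eq_countP] at h1
      have h2' : 2 ≤ S.countP (fun a => (text.count a : Int) == m) := by
        rw [List.countP_eq_length_filter]
        apply two_mem_length _ x fav
        · simp [List.mem_filter, hx, heq]
        · simp [List.mem_filter, hfavS, h2]
        · exact (Ne.symm hne)
      omega
  · intro h
    have hm : m = (text.count fav : Int) := by
      have hmem := PySem.List.max?_mem hmax
      rcases List.mem_map.mp hmem with ⟨x, hx, hxe⟩
      by_cases hxf : x = fav
      · rw [hxf] at hxe; omega
      · have := h x hx hxf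
        have := hle fav hfavS
        omega
    constructor
    · rw [count_map_eq_countP]
      have : S.countP (fun a => (text.count a : Int) == m) = S.countP (fun a => a == fav) := by
        apply List.countP_congr
        intro x hx
        by_cases hxf : x = fav
        · simp [hxf, hm]
        · have := h x hx hxf
          simp [hxf]
          omega
      rw [this]
      have : S.countP (fun a => a == fav) = S.count fav := rfl
      rw [this]
      exact List.count_eq_one_of_mem hnd hfavS
    · omega

-- B as a proposition
theorem alt_eq_decide (text : List Int) (fav : Int) (hfav : fav ∈ text) :
    is_most_frequent_alt text fav
      = decide (∀ x ∈ PySem.Set.ofList text, x ≠ fav → text.count x < text.count fav) := by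
  have hc : PySem.List.count text fav ≠ 0 := by
    simp [PySem.List.count_eq, List.count_eq_zero]
    exact hfav
  simp only [is_most_frequent_alt, if_neg hc]
  rw [Bool.eq_iff_iff]
  simp only [List.all_eq_true, List.mem_filter, decide_eq_true_eq,
    PySem.List.count_eq, Bool.not_eq_eq_eq_not, Bool.not_true, beq_eq_false_iff_ne, ne_eq]
  constructor
  · intro h x hx hne
    exact h x ⟨hx, hne⟩
  · intro h x hx
    exact h x hx.1 hx.2

theorem main (text : List Int) (fav : Int) : is_most_frequent text fav = is_most_frequent_alt text fav := by
  by_cases hfav : fav ∈ text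
  · have hkeys : (PySem.Dict.counter text).keys = PySem.Set.ofList text := PySem.Dict.keys_counter text
    have hvals : (PySem.Dict.counter text).values
        = (PySem.Set.ofList text).map (fun k => (text.count k : Int)) := by
      show ((PySem.Dict.counter text).items).map (·.2) = _
      rw [PySem.Dict.items_counter]; simp
    have hfavS : fav ∈ PySem.Set.ofList text := (PySem.Set.mem_ofList text fav).mpr hfav
    have hcontains : List.contains (PySem.Set.ofList text) fav = true := by
      simpa using hfavS
    rw [alt_eq_decide text fav hfav]
    simp only [is_most_frequent, freqA_eq_counter, hkeys, hvals]
    rw [hcontains]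
    simp only [Bool.not_true, Bool.false_eq_true, if_false]
    by_cases hlen : (PySem.Set.ofList text).length = 1
    · -- S = [fav]
      have hS : PySem.Set.ofList text = [fav] := by
        rcases List.length_eq_one_iff.mp hlen with ⟨a, ha⟩
        rw [ha] at hfavS ⊢
        simp at hfavS; rw [hfavS]
      simp only [hlen, if_true]
      rw [hS]
      simp
    · simp only [hlen, if_false]
      have hne : (PySem.Set.ofList text).map (fun k => (text.count k : Int)) ≠ [] := by
        simp only [ne_eq, List.map_eq_nil_iff]
        intro h
        rw [h] at hfavS
        simp at hfavS
      cases hmax : PySem.List.max? ((PySem.Set.ofList text).map (fun k => (text.count k : Int))) (fun v => v) with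
      | none => exact absurd ((PySem.List.max?_eq_none_iff _ _).mp hmax) hne
      | some m =>
        have hiff := main_iff text fav m hfav hmax
        have hgetD : (PySem.Dict.counter text).getD fav 0 = (text.count fav : Int) := by
          rw [PySem.Dict.getD_counter]
        rw [hgetD]
        simp only [PySem.List.count_eq]
        split_ifs with h
        · simp only [Bool.and_eq_true, decide_eq_true_eq, beq_iff_eq] at h
          exact (decide_eq_true (hiff.mp h)).symm
        · simp only [Bool.and_eq_true, decide_eq_true_eq, beq_iff_eq] at h
          have hnp := (mt hiff.mpr) h
          rw [eq_comm, decide_eq_false_iff_not]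
          exact hnp
  · have hcontains : (PySem.Set.ofList text).contains fav = false := by
      simp [PySem.Set.mem_ofList, hfav]
    have hc0 : PySem.List.count text fav = 0 := by
      simp [PySem.List.count_eq, List.count_eq_zero.mpr hfav]
    simp [is_most_frequent, is_most_frequent_alt, freqA_eq_counter, PySem.Dict.keys_counter,
      PySem.List.count_eq, hfav, List.count_eq_zero]

-- ===== VERDICT (by name: the statement is the Claim_ definition above) =====
theorem is_most_frequent_spec : Claim_equal_is_most_frequent := by
  intro text fav _
  unfold Spec_is_most_frequent
  exact main text fav
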